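-- pv_equiv track=rewrite | github.com/ykpyck/vc-optimizer | src/baselineIlpUtils.py | transaction_uniqueness
-- ===== SOURCE A (Python) =====
-- def transaction_uniqueness(T, P, val_dyn, row_dyn, col_dyn, row_cons_iterator, rhs):
--     t_index = 0
--     for t in T:
--         col_path_iterator = 0
--         for path in P:
--             if path[1] == t_index:
--                 val_dyn.append(-1)
--                 row_dyn.append(row_cons_iterator)
--                 col_dyn.append(col_path_iterator)
--             col_path_iterator += 1
--         rhs[row_cons_iterator] = -1
--         row_cons_iterator += 1
--         t_index += 1
--     return val_dyn, row_dyn, col_dyn, row_cons_iterator, rhs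
-- ===== SOURCE B (Python) =====
-- def transaction_uniqueness(T, P, val_dyn, row_dyn, col_dyn, row_cons_iterator, rhs):
--     # Bucket path indices by path[1] in one pass, then emit one group per transaction.
--     buckets = {}
--     for j, path in enumerate(P):
--         buckets.setdefault(path[1], []).append(j)
--     for i in range(len(T)):
--         cols = buckets.get(i, [])
--         val_dyn += [-1] * len(cols)
--         row_dyn += [row_cons_iterator] * len(cols)
--         col_dyn += cols
--         rhs[row_cons_iterator] = -1
--         row_cons_iterator += 1
--     return val_dyn, row_dyn, col_dyn, row_cons_iterator, rhs
-- ===== Notes on version B (the rewrite author's own statement) =====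
-- stated objective: faster
-- what changed: Instead of rescanning all of P for every transaction, B buckets path indices by path[1] into a dict in a single pass over P and then emits each transaction's group by one dict lookup.
import Mathlib
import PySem

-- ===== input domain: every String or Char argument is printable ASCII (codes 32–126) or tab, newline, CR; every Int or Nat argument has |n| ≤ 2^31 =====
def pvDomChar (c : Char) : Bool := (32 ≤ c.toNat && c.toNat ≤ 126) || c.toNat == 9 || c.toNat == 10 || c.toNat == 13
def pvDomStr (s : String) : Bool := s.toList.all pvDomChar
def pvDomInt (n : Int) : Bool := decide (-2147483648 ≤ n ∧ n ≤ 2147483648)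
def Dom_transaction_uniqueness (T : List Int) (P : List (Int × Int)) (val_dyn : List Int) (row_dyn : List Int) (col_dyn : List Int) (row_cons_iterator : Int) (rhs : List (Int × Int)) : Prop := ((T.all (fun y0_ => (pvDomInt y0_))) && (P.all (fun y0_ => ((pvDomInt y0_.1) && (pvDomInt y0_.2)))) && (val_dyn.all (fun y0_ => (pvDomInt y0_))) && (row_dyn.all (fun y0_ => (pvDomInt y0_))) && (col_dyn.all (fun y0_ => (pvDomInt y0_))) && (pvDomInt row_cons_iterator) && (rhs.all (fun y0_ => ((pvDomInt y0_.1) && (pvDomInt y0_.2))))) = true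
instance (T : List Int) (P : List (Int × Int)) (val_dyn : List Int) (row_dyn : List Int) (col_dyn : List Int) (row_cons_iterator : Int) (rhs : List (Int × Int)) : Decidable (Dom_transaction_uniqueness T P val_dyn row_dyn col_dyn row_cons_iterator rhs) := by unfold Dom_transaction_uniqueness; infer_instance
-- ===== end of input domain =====

-- B replaces A's per-transaction rescan of P by one bucketing pass over P and per-transaction
-- dict lookups (asymptotically faster). Both versions mutate val_dyn/row_dyn/col_dyn/rhs in place
-- in Python identically; the equivalence proved here is about the returned tuple.

-- ===== PORT A =====
-- inner loop body: 'for path in P: if path[1] == t_index: …append…; col_path_iterator += 1'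
def tuA_inner (ti rci : Int) (st : List Int × List Int × List Int × Int) (path : Int × Int) :
    List Int × List Int × List Int × Int :=
  if path.2 = ti then (st.1 ++ [-1], st.2.1 ++ [rci], st.2.2.1 ++ [st.2.2.2], st.2.2.2 + 1)
  else (st.1, st.2.1, st.2.2.1, st.2.2.2 + 1)

-- outer loop body: state (t_index, val_dyn, row_dyn, col_dyn, row_cons_iterator, rhs-as-dict)
def tuA_step (P : List (Int × Int))
    (st : Int × List Int × List Int × List Int × Int × PySem.Dict Int Int) (_t : Int) :
    Int × List Int × List Int × List Int × Int × PySem.Dict Int Int :=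
  let inner := P.foldl (tuA_inner st.1 st.2.2.2.2.1) (st.2.1, st.2.2.1, st.2.2.2.1, 0)
  (st.1 + 1, inner.1, inner.2.1, inner.2.2.1, st.2.2.2.2.1 + 1,
    st.2.2.2.2.2.insert st.2.2.2.2.1 (-1))

def transaction_uniqueness (T : List Int) (P : List (Int × Int)) (val_dyn : List Int) (row_dyn : List Int) (col_dyn : List Int) (row_cons_iterator : Int) (rhs : List (Int × Int)) : List Int × List Int × List Int × Int × (List (Int × Int)) :=
  let s := T.foldl (tuA_step P)
    (0, val_dyn, row_dyn, col_dyn, row_cons_iterator, PySem.Dict.mk rhs)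
  (s.2.1, s.2.2.1, s.2.2.2.1, s.2.2.2.2.1, s.2.2.2.2.2.items)

-- ===== PORT B =====
-- 'for j, path in enumerate(P): buckets.setdefault(path[1], []).append(j)'
def tuB_buckets (P : List (Int × Int)) : PySem.Dict Int (List Int) :=
  (PySem.List.enumerate P).foldl
    (fun d jp => d.modify jp.2.2 [] (fun l => l ++ [jp.1])) PySem.Dict.empty

-- loop body of 'for i in range(len(T))': state (val_dyn, row_dyn, col_dyn, row_cons_iterator, rhs)
def tuB_step (buckets : PySem.Dict Int (List Int))
    (st : List Int × List Int × List Int × Int × PySem.Dict Int Int) (i : Int) :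
    List Int × List Int × List Int × Int × PySem.Dict Int Int :=
  let cols := buckets.getD i []
  (st.1 ++ List.replicate cols.length (-1), st.2.1 ++ List.replicate cols.length st.2.2.2.1,
    st.2.2.1 ++ cols, st.2.2.2.1 + 1, st.2.2.2.2.insert st.2.2.2.1 (-1))

def transaction_uniqueness_alt (T : List Int) (P : List (Int × Int)) (val_dyn : List Int) (row_dyn : List Int) (col_dyn : List Int) (row_cons_iterator : Int) (rhs : List (Int × Int)) : List Int × List Int × List Int × Int × (List (Int × Int)) :=
  let s := (PySem.List.pyRange 0 (T.length : Int) 1).foldl (tuB_step (tuB_buckets P))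
    (val_dyn, row_dyn, col_dyn, row_cons_iterator, PySem.Dict.mk rhs)
  (s.1, s.2.1, s.2.2.1, s.2.2.2.1, s.2.2.2.2.items)

-- ===== PRECONDITION & SPEC =====
def Spec_transaction_uniqueness (T : List Int) (P : List (Int × Int)) (val_dyn : List Int) (row_dyn : List Int) (col_dyn : List Int) (row_cons_iterator : Int) (rhs : List (Int × Int)) (out : List Int × List Int × List Int × Int × (List (Int × Int))) : Prop := out = transaction_uniqueness_alt T P val_dyn row_dyn col_dyn row_cons_iterator rhs
instance (T : List Int) (P : List (Int × Int)) (val_dyn : List Int) (row_dyn : List Int) (col_dyn : List Int) (row_cons_iterator : Int) (rhs : List (Int × Int)) (out : List Int × List Int × List Int × Int × (List (Int × Int))) : Decidable (Spec_transaction_uniqueness T P val_dyn row_dyn col_dyn row_cons_iterator rhs out) := by unfold Spec_transaction_uniqueness; infer_instance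

-- ===== CLAIM (what is proved, stated in full; the proofs are below) =====
def Claim_equal_transaction_uniqueness : Prop := ∀ (T : List Int) (P : List (Int × Int)) (val_dyn : List Int) (row_dyn : List Int) (col_dyn : List Int) (row_cons_iterator : Int) (rhs : List (Int × Int)), Dom_transaction_uniqueness T P val_dyn row_dyn col_dyn row_cons_iterator rhs → Spec_transaction_uniqueness T P val_dyn row_dyn col_dyn row_cons_iterator rhs (transaction_uniqueness T P val_dyn row_dyn col_dyn row_cons_iterator rhs)

-- ===== LEMMAS AND PROOFS =====

-- the indices (starting at s) of the paths in P whose second component is ti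
def idxCols : List (Int × Int) → Int → Int → List Int
  | [], _, _ => []
  | p :: ps, ti, s => (if p.2 = ti then [s] else []) ++ idxCols ps ti (s + 1)

-- A's inner loop appends exactly the bucket of ti
theorem tuA_inner_foldl (P : List (Int × Int)) (ti rci : Int) :
    ∀ (v r c : List Int) (j : Int),
      P.foldl (tuA_inner ti rci) (v, r, c, j) =
        (v ++ List.replicate (idxCols P ti j).length (-1),
         r ++ List.replicate (idxCols P ti j).length rci,
         c ++ idxCols P ti j, j + P.length) := by
  induction P with
  | nil => intro v r c j; simp [idxCols]
  | cons p ps ih =>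
    intro v r c j
    simp only [List.foldl_cons, tuA_inner, idxCols]
    by_cases h : p.2 = ti
    · simp only [if_pos h, ih, List.length_cons, List.replicate_succ,
        List.cons_append, List.append_assoc, Prod.mk.injEq]
      refine ⟨?_, ?_, ?_, ?_⟩ <;> first | trivial | (push_cast; ring)
    · simp only [if_neg h, ih, List.nil_append, List.length_cons, Prod.mk.injEq]
      refine ⟨?_, ?_, ?_, ?_⟩ <;> first | trivial | (push_cast; ring)

-- the bucketing loop: looking up ti yields exactly idxCols
theorem tuB_buckets_fold (P : List (Int × Int)) :
    ∀ (s : Int) (d : PySem.Dict Int (List Int)) (ti : Int),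
      (((PySem.List.enumerate P s).foldl
          (fun d jp => d.modify jp.2.2 [] (fun l => l ++ [jp.1])) d).getD ti []) =
        d.getD ti [] ++ idxCols P ti s := by
  induction P with
  | nil => intro s d ti; simp [PySem.List.enumerate_nil, idxCols]
  | cons p ps ih =>
    intro s d ti
    rw [PySem.List.enumerate_cons]
    simp only [List.foldl_cons, idxCols]
    rw [ih, PySem.Dict.getD_modify]
    by_cases h : p.2 = ti
    · rw [if_pos h.symm, h]
      simp [List.append_assoc]
    · rw [if_neg (fun hh => h hh.symm)]
      simp [if_neg h]

theorem tuB_buckets_getD (P : List (Int × Int)) (ti : Int) :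
    (tuB_buckets P).getD ti [] = idxCols P ti 0 := by
  unfold tuB_buckets
  rw [tuB_buckets_fold]
  simp

-- the two outer loops agree, for any starting t_index and state
theorem tu_outer (P : List (Int × Int)) :
    ∀ (T : List Int) (ti : Int) (v r c : List Int) (rci : Int) (rh : PySem.Dict Int Int),
      T.foldl (tuA_step P) (ti, v, r, c, rci, rh) =
        (ti + T.length,
         (PySem.List.pyRange ti (ti + T.length) 1).foldl (tuB_step (tuB_buckets P))
           (v, r, c, rci, rh)) := by
  intro T
  induction T with
  | nil =>
    intro ti v r c rci rh
    simp [PySem.List.pyRange_one_eq_nil (le_refl ti)]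
  | cons t ts ih =>
    intro ti v r c rci rh
    have hlt : ti < ti + ((t :: ts).length : Int) := by
      simp only [List.length_cons]; push_cast; omega
    rw [PySem.List.pyRange_one_cons hlt]
    simp only [List.foldl_cons]
    have hstep : tuA_step P (ti, v, r, c, rci, rh) t =
        (ti + 1, tuB_step (tuB_buckets P) (v, r, c, rci, rh) ti) := by
      simp only [tuA_step, tuB_step, tuA_inner_foldl, tuB_buckets_getD]
    have harith : ti + ((t :: ts).length : Int) = (ti + 1) + (ts.length : Int) := by
      simp only [List.length_cons]; push_cast; ring
    rw [hstep, ih, harith]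

-- ===== VERDICT (by name: the statement is the Claim_ definition above) =====
theorem transaction_uniqueness_spec : Claim_equal_transaction_uniqueness := by
  intro T P v r c rci rhs _
  unfold Spec_transaction_uniqueness transaction_uniqueness transaction_uniqueness_alt
  rw [tu_outer]
  simp
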